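-- pv_equiv track=rewrite | github.com/johnjosephhorton/rubin | analysis/combined_grid.py | create_title_with_worker_assignments
-- ===== SOURCE A (Python) =====
-- def create_title_with_worker_assignments(W):
--     """
--     Create a title string showing task sequence grouped by workers
--     Example: Job Design [(1)(2)][(3)(4)][(5)(6)] for 6 tasks split between 3 workers
--     """
--     # Initialize variables
--     current_worker = W[0]
--     groups = []
--     current_group = []
--
--     # Group tasks by worker
--     for task_idx, worker in enumerate(W, 1):
--         if worker != current_worker:
--             groups.append(current_group)
--             current_group = []
--             current_worker = worker
--         current_group.append(str(task_idx))
--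
--     # Add the last group
--     groups.append(current_group)
--
--     # Create the formatted string
--     worker_sections = [
--         "[" + "".join(f"({task})" for task in group) + "]" for group in groups
--     ]
--     return "Job Design " + "".join(worker_sections)
-- ===== SOURCE B (Python) =====
-- def create_title_with_worker_assignments(W):
--     """
--     Create the title by letting each task mark its own run boundaries: task i
--     emits '[' if its worker differs from the previous task's and ']' if it
--     differs from the next task's (no group accumulation, no worker state).
--     """
--     n = len(W)
--     pieces = []
--     for i in range(n):
--         open_b = "[" if i == 0 or W[i] != W[i - 1] else ""
--         close_b = "]" if i == n - 1 or W[i + 1] != W[i] else ""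
--         pieces.append(open_b + "(" + str(i + 1) + ")" + close_b)
--     return "Job Design " + "".join(pieces)
-- ===== Notes on version B (the rewrite author's own statement) =====
-- stated objective: alternative
-- what changed: Replaces A's state machine that accumulates index groups per worker (current_worker/current_group/groups) with a stateless per-task boundary marking: each task independently decides its own '[' and ']' by comparing its worker with its neighbours, so no intermediate group lists are ever built.
import Mathlib
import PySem

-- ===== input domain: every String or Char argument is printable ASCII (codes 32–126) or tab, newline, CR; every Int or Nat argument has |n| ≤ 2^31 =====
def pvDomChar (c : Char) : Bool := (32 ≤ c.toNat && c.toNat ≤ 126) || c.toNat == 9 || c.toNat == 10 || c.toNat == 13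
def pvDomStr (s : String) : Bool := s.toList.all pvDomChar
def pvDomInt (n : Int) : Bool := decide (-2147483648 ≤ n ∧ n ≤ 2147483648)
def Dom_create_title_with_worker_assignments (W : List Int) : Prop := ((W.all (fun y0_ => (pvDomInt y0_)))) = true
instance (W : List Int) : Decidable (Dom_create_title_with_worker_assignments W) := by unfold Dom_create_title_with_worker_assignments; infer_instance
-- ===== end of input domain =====

-- B replaces A's iterative grouping state machine with a structural recursion emitting per-task run-boundary brackets (alternative decomposition, no speed claim).


-- ===== PORT A =====
-- enumerate(W, 1)
def pvEnumFrom (i : Int) : List Int → List (Int × Int)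
  | [] => []
  | w :: ws => (i, w) :: pvEnumFrom (i + 1) ws

-- the for-loop: state (current_worker, groups, current_group)
def pvALoop : List (Int × Int) → Int → List (List String) → List String → List (List String)
  | [], _, groups, cur => groups ++ [cur]
  | (idx, w) :: rest, curw, groups, cur =>
      if w ≠ curw then pvALoop rest w (groups ++ [cur]) [PySem.Int.toStr idx]
      else pvALoop rest curw groups (cur ++ [PySem.Int.toStr idx])

-- "[" + "".join(f"({task})" for task in group) + "]"
def pvABracket (g : List String) : String :=
  "[" ++ String.join (g.map (fun t => "(" ++ t ++ ")")) ++ "]"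

def create_title_with_worker_assignments (W : List Int) : String :=
  match W with
  | [] => ""   -- Python raises IndexError indexing the first element; excluded by Pre_
  | w0 :: _ =>
      let groups := pvALoop (pvEnumFrom 1 W) w0 [] []
      "Job Design " ++ String.join (groups.map pvABracket)

-- ===== PORT B =====
-- one task's piece: '[' if its worker differs from the previous task's,
-- ']' if it differs from the next task's (short-circuited bounds checks first;
-- pyGetD's value at a guarded-away index is irrelevant since the disjunct already decides)
def pvPiece (W : List Int) (n : Int) (i : Int) : String :=
  (if i = 0 ∨ PySem.List.pyGetD W i 0 ≠ PySem.List.pyGetD W (i - 1) 0 then "[" else "")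
    ++ "(" ++ PySem.Int.toStr (i + 1) ++ ")"
    ++ (if i = n - 1 ∨ PySem.List.pyGetD W (i + 1) 0 ≠ PySem.List.pyGetD W i 0 then "]" else "")

def create_title_with_worker_assignments_alt (W : List Int) : String :=
  "Job Design " ++ String.join ((PySem.List.pyRange 0 (W.length : Int) 1).map
      (pvPiece W (W.length : Int)))

-- ===== PRECONDITION & SPEC =====
-- A indexes the first element, which raises IndexError on the empty list; Pre_ excludes exactly that input.
def Pre_create_title_with_worker_assignments (W : List Int) : Prop := W ≠ []
instance (W : List Int) : Decidable (Pre_create_title_with_worker_assignments W) := by unfold Pre_create_title_with_worker_assignments; infer_instance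
def pvWitness_create_title_with_worker_assignments : List Int := [1, 2, 2]

def Spec_create_title_with_worker_assignments (W : List Int) (out : String) : Prop := out = create_title_with_worker_assignments_alt W
instance (W : List Int) (out : String) : Decidable (Spec_create_title_with_worker_assignments W out) := by unfold Spec_create_title_with_worker_assignments; infer_instance

-- ===== CLAIM (what is proved, stated in full; the proofs are below) =====
def Claim_equal_create_title_with_worker_assignments : Prop := ∀ (W : List Int), Dom_create_title_with_worker_assignments W → Pre_create_title_with_worker_assignments W → Spec_create_title_with_worker_assignments W (create_title_with_worker_assignments W)

-- ===== LEMMAS AND PROOFS =====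

-- canonical run-by-run rendering A is reduced to
def pvRunLen (v : Int) : List Int → Nat
  | [] => 0
  | x :: xs => if x ≠ v then 0 else pvRunLen v xs + 1

def pvSecs : List Int → Int → String
  | [], _ => ""
  | v :: tail, i =>
      let r := pvRunLen v tail
      let n : Int := 1 + (r : Int)
      let sec := "[" ++ String.join ((PySem.List.pyRange i (i + n) 1).map
                    (fun k => "(" ++ PySem.Int.toStr k ++ ")")) ++ "]"
      sec ++ pvSecs (tail.drop r) (i + n)
termination_by xs _ => xs.length
decreasing_by simp

theorem pvJoinAppend (a b : List String) : String.join (a ++ b) = String.join a ++ String.join b := by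
  simp [String.join_eq, List.flatten_append]

theorem pvJoinSingleton (x : String) : String.join [x] = x := by
  simp [String.join_eq]

theorem pvJoinCons (x : String) (l : List String) : String.join (x :: l) = x ++ String.join l := by
  simp [String.join_eq]

-- rendered tail of A's loop, with groups already flushed factored out
def pvRL : List (Int × Int) → Int → List String → String
  | [], _, cur => pvABracket cur
  | (idx, w) :: rest, v, cur =>
      if w ≠ v then pvABracket cur ++ pvRL rest w [PySem.Int.toStr idx]
      else pvRL rest v (cur ++ [PySem.Int.toStr idx])

theorem pvALoop_render (pairs : List (Int × Int)) : ∀ (v : Int) (groups : List (List String)) (cur : List String),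
    String.join ((pvALoop pairs v groups cur).map pvABracket)
      = String.join (groups.map pvABracket) ++ pvRL pairs v cur := by
  induction pairs with
  | nil =>
      intro v groups cur
      simp [pvALoop, pvRL, pvJoinAppend, pvJoinSingleton]
  | cons p rest ih =>
      intro v groups cur
      obtain ⟨idx, w⟩ := p
      simp only [pvALoop, pvRL]
      by_cases h : w ≠ v
      · simp only [if_pos h, ih, List.map_append, pvJoinAppend]
        simp [String.append_assoc, pvJoinSingleton]
      · simp only [if_neg h, ih]

theorem pvKey (ws : List Int) : ∀ (i j v : Int), j ≤ i →
    pvRL (pvEnumFrom i ws) v ((PySem.List.pyRange j i 1).map PySem.Int.toStr)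
      = pvABracket ((PySem.List.pyRange j (i + (pvRunLen v ws : Int)) 1).map PySem.Int.toStr)
          ++ pvSecs (ws.drop (pvRunLen v ws)) (i + (pvRunLen v ws : Int)) := by
  induction ws with
  | nil =>
      intro i j v _
      simp [pvEnumFrom, pvRL, pvRunLen, pvSecs, String.append_empty]
  | cons w rest ih =>
      intro i j v hji
      simp only [pvEnumFrom, pvRL]
      by_cases h : w ≠ v
      · simp only [pvRunLen, if_pos h]
        have h1 : [PySem.Int.toStr i] = (PySem.List.pyRange i (i + 1) 1).map PySem.Int.toStr := by
          rw [PySem.List.pyRange_one_singleton]; rfl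
        rw [h1, ih (i + 1) i w (by omega)]
        have hsec : pvSecs (w :: rest) i
            = pvABracket ((PySem.List.pyRange i (i + 1 + (pvRunLen w rest : Int)) 1).map PySem.Int.toStr)
                ++ pvSecs (rest.drop (pvRunLen w rest)) (i + 1 + (pvRunLen w rest : Int)) := by
          simp only [pvSecs]
          have harr : i + (1 + (pvRunLen w rest : Int)) = i + 1 + (pvRunLen w rest : Int) := by ring
          rw [harr]
          congr 1
          simp [pvABracket, List.map_map, Function.comp_def]
        simp only [Nat.cast_zero, add_zero, List.drop_zero, hsec]
      · rw [Classical.not_not] at h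
        subst h
        simp only [pvRunLen, if_neg (not_not_intro (Eq.refl w))]
        have h2 : (PySem.List.pyRange j i 1).map PySem.Int.toStr ++ [PySem.Int.toStr i]
            = (PySem.List.pyRange j (i + 1) 1).map PySem.Int.toStr := by
          rw [PySem.List.pyRange_one_succ_right hji, List.map_append]; rfl
        rw [h2, ih (i + 1) j w (by omega)]
        have harr : i + 1 + (pvRunLen w rest : Int) = i + ((pvRunLen w rest + 1 : Nat) : Int) := by
          push_cast; ring
        rw [harr]
        rfl

-- A's rendering equals the canonical one (on nonempty W)
theorem pvA_eq_secs (w0 : Int) (rest : List Int) :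
    create_title_with_worker_assignments (w0 :: rest) = "Job Design " ++ pvSecs (w0 :: rest) 1 := by
  show "Job Design " ++ String.join ((pvALoop (pvEnumFrom 1 (w0 :: rest)) w0 [] []).map pvABracket)
      = "Job Design " ++ pvSecs (w0 :: rest) 1
  congr 1
  have hnil : ([] : List String) = (PySem.List.pyRange 1 1 1).map PySem.Int.toStr := by
    rw [PySem.List.pyRange_one_eq_nil (by omega)]; rfl
  rw [pvALoop_render, hnil, pvKey (w0 :: rest) 1 1 w0 (by omega)]
  have hrun : pvRunLen w0 (w0 :: rest) = pvRunLen w0 rest + 1 := by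
    simp [pvRunLen]
  rw [hrun]
  simp only [pvSecs]
  simp only [List.drop_succ_cons]
  have harr : (1 : Int) + ((pvRunLen w0 rest + 1 : Nat) : Int) = 1 + (1 + (pvRunLen w0 rest : Int)) := by
    push_cast; ring
  rw [harr]
  simp [pvABracket, List.map_map, Function.comp_def, String.join_eq, String.append_assoc]

-- per-element rendering with the previous worker carried along (bridge between the two ports)
def pvRender : Option Int → List Int → Int → String
  | _, [], _ => ""
  | prev, w :: tail, i =>
      (if some w ≠ prev then "[" else "")
        ++ "(" ++ PySem.Int.toStr i ++ ")"
        ++ (match tail with | [] => "]" | t :: _ => if t ≠ w then "]" else "")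
        ++ pvRender (some w) tail (i + 1)

-- the close mark B's piece emits, as a function of the lookahead
def pvCl (xs : List Int) (v : Int) : String :=
  match xs with | [] => "]" | t :: _ => if t ≠ v then "]" else ""

-- body of a canonical section equals B's piecewise tail
theorem pvBody_eq_render (xs : List Int) : ∀ (i v : ℤ),
    String.join ((PySem.List.pyRange i (i + (1 + (pvRunLen v xs : Int))) 1).map
        (fun k => "(" ++ PySem.Int.toStr k ++ ")")) ++ ("]"
      ++ pvSecs (xs.drop (pvRunLen v xs)) (i + (1 + (pvRunLen v xs : Int))))
    = "(" ++ PySem.Int.toStr i ++ ")" ++ (pvCl xs v ++ pvRender (some v) xs (i + 1)) := by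
  induction xs with
  | nil =>
      intro i v
      simp only [pvRunLen, Nat.cast_zero, add_zero, List.drop_nil, pvSecs, pvCl, pvRender]
      rw [PySem.List.pyRange_one_singleton]
      simp [pvJoinSingleton, String.append_assoc]
  | cons x xs ih =>
      intro i v
      by_cases h : x = v
      · subst h
        have hrun : pvRunLen x (x :: xs) = pvRunLen x xs + 1 := by simp [pvRunLen]
        rw [hrun]
        have hcons : PySem.List.pyRange i (i + (1 + ((pvRunLen x xs + 1 : Nat) : Int))) 1
            = i :: PySem.List.pyRange (i + 1) (i + (1 + ((pvRunLen x xs + 1 : Nat) : Int))) 1 := by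
          rw [PySem.List.pyRange_one_cons (by push_cast; omega)]
        have harr : i + (1 + ((pvRunLen x xs + 1 : Nat) : Int)) = (i + 1) + (1 + (pvRunLen x xs : Int)) := by
          push_cast; ring
        rw [hcons, List.map_cons, pvJoinCons, harr]
        simp only [List.drop_succ_cons]
        rw [String.append_assoc, ih (i + 1) x]
        simp only [pvCl, pvRender]
        simp [String.append_assoc]
      · have hrun : pvRunLen v (x :: xs) = 0 := by simp [pvRunLen, h]
        rw [hrun]
        simp only [Nat.cast_zero, add_zero, List.drop_zero]
        rw [PySem.List.pyRange_one_singleton]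
        have hne : (some x ≠ some v) := by simpa using h
        have hsec : pvSecs (x :: xs) (i + 1)
            = "[" ++ ("(" ++ PySem.Int.toStr (i + 1) ++ ")" ++ (pvCl xs x ++ pvRender (some x) xs (i + 1 + 1))) := by
          simp only [pvSecs]
          rw [String.append_assoc, ← ih (i + 1) x]
          simp [String.append_assoc]
        rw [hsec]
        simp only [pvCl, pvRender, if_pos h, if_pos hne]
        simp [String.append_assoc, pvJoinSingleton]
        rfl

-- canonical rendering equals B's recursion
theorem pvSecs_eq_render (v : Int) (xs : List Int) (i : Int) (prev : Option Int) (hprev : some v ≠ prev) :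
    pvSecs (v :: xs) i = pvRender prev (v :: xs) i := by
  simp only [pvSecs, pvRender, if_pos hprev]
  rw [String.append_assoc, String.append_assoc, pvBody_eq_render xs i v]
  simp only [pvCl]
  simp [String.append_assoc]
  rfl

-- B's join of per-task pieces equals the carried-prev rendering
theorem pvPieces_render (W : List Int) (a : Nat) (prev : Option Int)
    (hprev : (a = 0 ∧ prev = none) ∨ (0 < a ∧ a ≤ W.length ∧ prev = some (W.getD (a - 1) 0))) :
    String.join ((PySem.List.pyRange (a : Int) (W.length : Int) 1).map (pvPiece W (W.length : Int)))
      = pvRender prev (W.drop a) ((a : Int) + 1) := by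
  by_cases hlt : a < W.length
  · rw [PySem.List.pyRange_one_cons (by exact_mod_cast hlt), List.map_cons, pvJoinCons]
    have hdrop : W.drop a = W[a] :: W.drop (a + 1) := List.drop_eq_getElem_cons hlt
    rw [hdrop]
    have hgetA : PySem.List.pyGetD W (a : Int) 0 = W[a] := by
      simp [PySem.List.pyGetD_natCast, List.getD_eq_getElem?_getD, hlt]
    have hrec : String.join ((PySem.List.pyRange ((a : Int) + 1) (W.length : Int) 1).map
            (pvPiece W (W.length : Int)))
        = pvRender (some W[a]) (W.drop (a + 1)) (((a + 1 : Nat) : Int) + 1) := by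
      have := pvPieces_render W (a + 1) (some W[a])
        (Or.inr ⟨by omega, by omega, by simp [List.getD_eq_getElem?_getD, hlt]⟩)
      simpa using this
    simp only [pvPiece, pvRender]
    have hopen : (if (a : Int) = 0 ∨ PySem.List.pyGetD W (a : Int) 0 ≠ PySem.List.pyGetD W ((a : Int) - 1) 0 then "[" else "")
        = (if some W[a] ≠ prev then "[" else "") := by
      rcases hprev with ⟨ha, hp⟩ | ⟨ha, -, hp⟩
      · subst ha; subst hp; simp
      · subst hp
        have ha0 : ¬ ((a : Int) = 0) := by omega
        have hprevlt : a - 1 < W.length := by omega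
        have hgetP : PySem.List.pyGetD W ((a : Int) - 1) 0 = W.getD (a - 1) 0 := by
          have hc : (a : Int) - 1 = ((a - 1 : Nat) : Int) := by omega
          rw [hc, PySem.List.pyGetD_natCast]
        rw [hgetA, hgetP]
        by_cases he : W[a] = W.getD (a - 1) 0
        · rw [if_neg (by simp [he]; omega), if_neg (by simp [he])]
        · rw [if_pos (Or.inr he), if_pos (by simp; rw [← List.getD_eq_getElem?_getD]; exact he)]
    have hclose : (if (a : Int) = (W.length : Int) - 1 ∨ PySem.List.pyGetD W ((a : Int) + 1) 0 ≠ PySem.List.pyGetD W (a : Int) 0 then "]" else "")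
        = (match W.drop (a + 1) with | [] => "]" | t :: _ => if t ≠ W[a] then "]" else "") := by
      by_cases hlast : a + 1 = W.length
      · have : W.drop (a + 1) = [] := List.drop_eq_nil_of_le (by omega)
        rw [this]
        have : (a : Int) = (W.length : Int) - 1 := by omega
        simp [this]
      · have hlt2 : a + 1 < W.length := by omega
        have hdrop2 : W.drop (a + 1) = W[a + 1] :: W.drop (a + 2) := List.drop_eq_getElem_cons hlt2
        rw [hdrop2]
        have hgetN : PySem.List.pyGetD W ((a : Int) + 1) 0 = W[a + 1] := by
          have hc : (a : Int) + 1 = ((a + 1 : Nat) : Int) := by omega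
          rw [hc, PySem.List.pyGetD_natCast]
          simp [List.getD_eq_getElem?_getD, hlt2]
        have hno : ¬ ((a : Int) = (W.length : Int) - 1) := by omega
        rw [hgetN, hgetA]
        by_cases he : W[a + 1] = W[a] <;> simp [he, hno]
    rw [hopen, hclose, hrec]
    have hc : (((a + 1 : Nat) : Int) + 1) = (a : Int) + 1 + 1 := by omega
    rw [hc]
  · have h1 : PySem.List.pyRange (a : Int) (W.length : Int) 1 = [] :=
      PySem.List.pyRange_one_eq_nil (by exact_mod_cast Nat.le_of_not_lt hlt)
    have h2 : W.drop a = [] := List.drop_eq_nil_of_le (Nat.le_of_not_lt hlt)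
    rw [h1, h2]
    rfl
termination_by W.length - a
decreasing_by omega

-- ===== VERDICT (by name: the statement is the Claim_ definition above) =====
theorem create_title_with_worker_assignments_spec : Claim_equal_create_title_with_worker_assignments := by
  intro W _ hpre
  unfold Spec_create_title_with_worker_assignments
  match W with
  | [] => exact absurd rfl hpre
  | w0 :: rest =>
      show create_title_with_worker_assignments (w0 :: rest)
          = "Job Design " ++ String.join ((PySem.List.pyRange 0 ((w0 :: rest).length : Int) 1).map
              (pvPiece (w0 :: rest) ((w0 :: rest).length : Int)))
      rw [pvA_eq_secs]
      have h := pvPieces_render (w0 :: rest) 0 none (Or.inl ⟨rfl, rfl⟩)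
      simp only [Nat.cast_zero, List.drop_zero, zero_add] at h
      rw [h, pvSecs_eq_render w0 rest 1 none (by simp)]
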